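-- pv_equiv track=rewrite | github.com/PythonGoesReddit/Reddit_MDA | Reddit_Bibers_Features.py | feature_48
-- ===== SOURCE A (Python) =====
-- def feature_48(untagged_list):
--     """This function takes a list of words without PoS tags as input and returns the number of items
--     that are amplifiers."""
--     counter = 0
--     amplifierlist = ["absolutely", "altogether", "completely", "enormously", "entirely",
--                      "extremely", "fully", "greatly", "highly", "intensely", "perfectly", "strongly",
--                      "thoroughly", "totally", "utterly", "very"]
--     for item in untagged_list:
--         if item in amplifierlist:
--             counter = counter + 1
--         else:
--             pass
--     return(counter)
-- ===== SOURCE B (Python) =====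
-- from collections import Counter
--
-- def feature_48(untagged_list):
--     """Count how many items are amplifiers: build a frequency table once,
--     then sum the counts of the 16 amplifier words."""
--     amplifierlist = ["absolutely", "altogether", "completely", "enormously", "entirely",
--                      "extremely", "fully", "greatly", "highly", "intensely", "perfectly", "strongly",
--                      "thoroughly", "totally", "utterly", "very"]
--     counts = Counter(untagged_list)
--     return sum(counts[w] for w in amplifierlist)
-- ===== Notes on version B (the rewrite author's own statement) =====
-- stated objective: alternative
-- what changed: Instead of scanning every input item and testing list membership, B builds a Counter frequency table of the input once and sums the frequencies of the 16 fixed amplifier words.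
import Mathlib
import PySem

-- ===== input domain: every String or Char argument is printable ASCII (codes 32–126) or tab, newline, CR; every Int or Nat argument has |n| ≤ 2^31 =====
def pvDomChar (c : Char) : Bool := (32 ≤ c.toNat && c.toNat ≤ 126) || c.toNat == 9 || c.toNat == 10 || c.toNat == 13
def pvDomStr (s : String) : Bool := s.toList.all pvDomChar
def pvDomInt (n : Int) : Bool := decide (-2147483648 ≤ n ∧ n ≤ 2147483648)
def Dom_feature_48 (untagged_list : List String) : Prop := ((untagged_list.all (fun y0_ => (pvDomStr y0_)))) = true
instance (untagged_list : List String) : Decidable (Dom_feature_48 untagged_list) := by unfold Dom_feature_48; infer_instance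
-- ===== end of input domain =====

-- ===== PORT A =====
-- B changes the decomposition: a Counter frequency table summed over the fixed amplifier words,
-- instead of A's per-item membership scan (objective: alternative, same result).
def ampList : List String :=
  ["absolutely", "altogether", "completely", "enormously", "entirely",
   "extremely", "fully", "greatly", "highly", "intensely", "perfectly", "strongly",
   "thoroughly", "totally", "utterly", "very"]

def feature_48 (untagged_list : List String) : Int :=
  untagged_list.foldl (fun counter item => if item ∈ ampList then counter + 1 else counter) 0

-- ===== PORT B =====
def feature_48_alt (untagged_list : List String) : Int :=
  let counts := PySem.Dict.counter untagged_list
  ampList.foldl (fun s w => s + counts.getD w 0) 0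

-- ===== PRECONDITION & SPEC =====
def Spec_feature_48 (untagged_list : List String) (out : Int) : Prop := out = feature_48_alt untagged_list
instance (untagged_list : List String) (out : Int) : Decidable (Spec_feature_48 untagged_list out) := by unfold Spec_feature_48; infer_instance

-- ===== CLAIM (what is proved, stated in full; the proofs are below) =====
def Claim_equal_feature_48 : Prop := ∀ (untagged_list : List String), Dom_feature_48 untagged_list → Spec_feature_48 untagged_list (feature_48 untagged_list)

-- ===== LEMMAS AND PROOFS =====

-- A's loop with accumulator c adds the number of items that lie in ampList.
theorem featA_foldl (xs : List String) (c : Int) :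
    xs.foldl (fun counter item => if item ∈ ampList then counter + 1 else counter) c
      = c + (xs.countP (fun x => decide (x ∈ ampList)) : Int) := by
  induction xs generalizing c with
  | nil => simp
  | cons x xs ih =>
    simp only [List.foldl_cons, List.countP_cons, ih]
    by_cases h : x ∈ ampList <;> simp [h] <;> ring

-- countP of membership in w :: L splits into count of w plus countP of membership in L, when w ∉ L.
theorem countP_mem_cons (w : String) (L xs : List String) (hw : w ∉ L) :
    xs.countP (fun x => decide (x ∈ w :: L))
      = xs.count w + xs.countP (fun x => decide (x ∈ L)) := by
  induction xs with
  | nil => simp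
  | cons y ys ihy =>
    simp only [List.countP_cons, List.count_cons, ihy]
    by_cases hy : y = w
    · subst hy; simp [hw]; omega
    · by_cases hyL : y ∈ L <;> simp [hy, hyL, List.mem_cons] <;> omega

-- B's loop sums xs.count w over a duplicate-free list of words; equals the countP of membership.
theorem featB_foldl (L : List String) (hL : L.Nodup) (xs : List String) (s : Int) :
    L.foldl (fun s w => s + (xs.count w : Int)) s
      = s + (xs.countP (fun x => decide (x ∈ L)) : Int) := by
  induction L generalizing s with
  | nil => simp
  | cons w L ih =>
    have hw : w ∉ L := (List.nodup_cons.mp hL).1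
    simp only [List.foldl_cons, ih (List.nodup_cons.mp hL).2]
    rw [countP_mem_cons w L xs hw]; push_cast; ring

-- ===== VERDICT (by name: the statement is the Claim_ definition above) =====
theorem feature_48_spec : Claim_equal_feature_48 := by
  intro xs _
  unfold Spec_feature_48 feature_48 feature_48_alt
  simp only [PySem.Dict.getD_counter]
  rw [featA_foldl, featB_foldl ampList (by decide) xs 0]
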